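-- pv_equiv track=rewrite | github.com/scottjrodgers/guitarist | tab_parser.py | is_numbers
-- ===== SOURCE A (Python) =====
-- def is_numbers(strings):
--     num_digits = 0
--     for ch in strings:
--         if ch.isdigit():
--             num_digits += 1
--         elif ch != '-':
--             return False
--     return num_digits > 0
-- ===== SOURCE B (Python) =====
-- def is_numbers(strings):
--     chars = set(strings)
--     return all(c.isdigit() or c == '-' for c in chars) and any(c.isdigit() for c in chars)
-- ===== Notes on version B (the rewrite author's own statement) =====
-- stated objective: idiomatic
-- what changed: Replaces the early-exit counting loop with a set-dedup of the characters followed by two quantifier passes (all digits-or-hyphens, any digit) over the unique characters.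
import Mathlib
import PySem

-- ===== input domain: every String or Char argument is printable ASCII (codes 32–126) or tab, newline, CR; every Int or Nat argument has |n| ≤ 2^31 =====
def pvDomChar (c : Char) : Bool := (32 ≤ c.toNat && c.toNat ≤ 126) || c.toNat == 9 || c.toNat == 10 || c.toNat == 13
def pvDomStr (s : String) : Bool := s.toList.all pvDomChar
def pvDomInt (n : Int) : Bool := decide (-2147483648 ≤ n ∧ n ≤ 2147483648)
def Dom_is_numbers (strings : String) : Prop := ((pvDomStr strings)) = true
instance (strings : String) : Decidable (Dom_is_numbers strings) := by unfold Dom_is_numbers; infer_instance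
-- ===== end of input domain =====

-- B replaces A's early-exit counting loop with a character-set dedup plus two quantifier passes (idiomatic; same return value).


-- ===== PORT A =====
-- the for-loop with the running digit count and the early `return False`
def pvLoopA : List Char → Int → Bool
  | [], numDigits => numDigits > 0
  | ch :: rest, numDigits =>
      if PySem.Chars.isdigit ch then pvLoopA rest (numDigits + 1)
      else if ch ≠ '-' then false
      else pvLoopA rest numDigits

def is_numbers (strings : String) : Bool := pvLoopA strings.toList 0

-- ===== PORT B =====
def is_numbers_alt (strings : String) : Bool :=
  let chars := PySem.Set.ofList strings.toList
  chars.all (fun c => PySem.Chars.isdigit c || c == '-') && chars.any (fun c => PySem.Chars.isdigit c)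

-- ===== PRECONDITION & SPEC =====
def Spec_is_numbers (strings : String) (out : Bool) : Prop := out = is_numbers_alt strings
instance (strings : String) (out : Bool) : Decidable (Spec_is_numbers strings out) := by unfold Spec_is_numbers; infer_instance

-- ===== CLAIM (what is proved, stated in full; the proofs are below) =====
def Claim_equal_is_numbers : Prop := ∀ (strings : String), Dom_is_numbers strings → Spec_is_numbers strings (is_numbers strings)

-- ===== LEMMAS AND PROOFS =====
-- A's loop characterised: all chars are digit-or-hyphen, and either the counter is already positive or some remaining char is a digit
theorem pvLoopA_eq (l : List Char) : ∀ n : Int, 0 ≤ n →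
    pvLoopA l n = (l.all (fun c => PySem.Chars.isdigit c || c == '-')
                   && (decide (0 < n) || l.any (fun c => PySem.Chars.isdigit c))) := by
  induction l with
  | nil => intro n _; simp [pvLoopA]
  | cons ch rest ih =>
      intro n hn
      by_cases hd : PySem.Chars.isdigit ch = true
      · simp [pvLoopA, hd, ih (n + 1) (by omega)]
        exact fun _ => Or.inl hn
      · by_cases hh : ch = '-'
        · have hdf : PySem.Chars.isdigit '-' = false := rfl
          subst hh
          simp [pvLoopA, hdf, ih n hn]
        · simp [pvLoopA, hd, hh]

theorem set_all_char (l : List Char) (p : Char → Bool) :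
    (PySem.Set.ofList l).all p = l.all p := by
  apply Bool.eq_iff_iff.mpr
  simp [List.all_eq_true, PySem.Set.mem_ofList]

theorem set_any_char (l : List Char) (p : Char → Bool) :
    (PySem.Set.ofList l).any p = l.any p := by
  apply Bool.eq_iff_iff.mpr
  simp [List.any_eq_true, PySem.Set.mem_ofList]

-- ===== VERDICT (by name: the statement is the Claim_ definition above) =====
theorem is_numbers_spec : Claim_equal_is_numbers := by
  intro s _
  unfold Spec_is_numbers is_numbers
  rw [pvLoopA_eq s.toList 0 (le_refl 0)]
  simp [is_numbers_alt, set_all_char, set_any_char]
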